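-- pv_equiv track=rewrite | github.com/maufrancom/OSMO | migrate_fields.py | smart_split_args
-- ===== SOURCE A (Python) =====
-- def smart_split_args(s):
--     """Split arguments by commas, respecting nested structures."""
--     parts = []
--     current = []
--     depth = 0
--     in_quote = None
--
--     for char in s:
--         if char in ('"', "'") and in_quote is None:
--             in_quote = char
--             current.append(char)
--         elif char == in_quote:
--             in_quote = None
--             current.append(char)
--         elif in_quote:
--             current.append(char)
--         elif char in ('(', '[', '{'):
--             depth += 1
--             current.append(char)
--         elif char in (')', ']', '}'):
--             depth -= 1
--             current.append(char)
--         elif char == ',' and depth == 0: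
--             parts.append(''.join(current))
--             current = []
--         else:
--             current.append(char)
--
--     if current:
--         text = ''.join(current).strip()
--         if text:
--             parts.append(''.join(current))
--
--     return parts
-- ===== SOURCE B (Python) =====
-- def smart_split_args(s):
--     """Split arguments by commas, respecting nested structures.
--     Records the indices of top-level commas in one scan, then slices."""
--     cuts = []
--     depth = 0
--     in_quote = None
--     for i, ch in enumerate(s):
--         if in_quote is not None:
--             if ch == in_quote:
--                 in_quote = None
--         elif ch in ('"', "'"):
--             in_quote = ch
--         elif ch in ('(', '[', '{'):
--             depth += 1
--         elif ch in (')', ']', '}'):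
--             depth -= 1
--         elif ch == ',' and depth == 0:
--             cuts.append(i)
--     parts = []
--     prev = 0
--     for cut in cuts:
--         parts.append(s[prev:cut])
--         prev = cut + 1
--     tail = s[prev:]
--     if tail.strip():
--         parts.append(tail)
--     return parts
-- ===== Notes on version B (the rewrite author's own statement) =====
-- stated objective: alternative
-- what changed: B keeps no per-segment character buffer: one scan records only the indices of top-level commas, and a second pass slices the string at those indices (tail appended only if it strips non-empty, as in A).
import Mathlib
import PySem

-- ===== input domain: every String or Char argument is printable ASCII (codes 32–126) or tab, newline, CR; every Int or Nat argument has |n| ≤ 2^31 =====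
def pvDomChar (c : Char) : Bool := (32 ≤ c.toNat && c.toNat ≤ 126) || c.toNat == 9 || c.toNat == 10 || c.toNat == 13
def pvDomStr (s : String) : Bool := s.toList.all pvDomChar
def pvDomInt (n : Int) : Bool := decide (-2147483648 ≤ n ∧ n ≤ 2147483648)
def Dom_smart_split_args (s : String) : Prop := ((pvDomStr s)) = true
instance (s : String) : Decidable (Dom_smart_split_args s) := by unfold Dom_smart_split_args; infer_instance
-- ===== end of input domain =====

-- B keeps no per-segment character buffer: one scan records the indices of
-- top-level commas, a second pass slices the string at those indices (alternative decomposition).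

-- ===== PORT A =====
-- one loop iteration of A: the branch ladder over (parts, current, depth, in_quote)
def pvAStep (st : List String × List Char × Int × Option Char) (c : Char) :
    List String × List Char × Int × Option Char :=
  match st with
  | (parts, cur, depth, inq) =>
    if (c = '"' ∨ c = '\'') ∧ inq = none then (parts, cur ++ [c], depth, some c)
    else if some c = inq then (parts, cur ++ [c], depth, none)
    else if inq ≠ none then (parts, cur ++ [c], depth, inq)
    else if c = '(' ∨ c = '[' ∨ c = '{' then (parts, cur ++ [c], depth + 1, inq)
    else if c = ')' ∨ c = ']' ∨ c = '}' then (parts, cur ++ [c], depth - 1, inq)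
    else if c = ',' ∧ depth = 0 then (parts ++ [String.ofList cur], [], depth, inq)
    else (parts, cur ++ [c], depth, inq)

-- A's code after the loop: 'if current: text = ''.join(current).strip(); if text: parts.append(...)'
def pvAFin (st : List String × List Char × Int × Option Char) : List String :=
  match st with
  | (parts, cur, _, _) =>
    if cur ≠ [] then
      if PySem.Chars.strip cur ≠ [] then parts ++ [String.ofList cur] else parts
    else parts

def smart_split_args (s : String) : List String :=
  pvAFin (s.toList.foldl pvAStep ([], [], 0, none))

-- ===== PORT B =====
-- one iteration of B's first scan over (i, depth, in_quote, cuts)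
def pvBScan (st : Nat × Int × Option Char × List Nat) (c : Char) :
    Nat × Int × Option Char × List Nat :=
  match st with
  | (i, depth, inq, cuts) =>
    match inq with
    | some q => (i + 1, depth, if c = q then none else some q, cuts)
    | none =>
      if c = '"' ∨ c = '\'' then (i + 1, depth, some c, cuts)
      else if c = '(' ∨ c = '[' ∨ c = '{' then (i + 1, depth + 1, none, cuts)
      else if c = ')' ∨ c = ']' ∨ c = '}' then (i + 1, depth - 1, none, cuts)
      else if c = ',' ∧ depth = 0 then (i + 1, depth, none, cuts ++ [i])
      else (i + 1, depth, none, cuts)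

-- one iteration of B's second loop: parts.append(s[prev:cut]); prev = cut + 1
-- (s[prev:cut] with 0 ≤ prev ≤ cut is exactly drop/take on the character list)
def pvBAcc (cs : List Char) (st : List String × Nat) (cut : Nat) : List String × Nat :=
  (st.1 ++ [String.ofList ((cs.drop st.2).take (cut - st.2))], cut + 1)

-- B's code after the scan: slice out the segments, then the stripped-tail rule
def pvBFin (cs : List Char) (st : Nat × Int × Option Char × List Nat) : List String :=
  match st with
  | (_, _, _, cuts) =>
    match cuts.foldl (pvBAcc cs) ([], 0) with
    | (parts, prev) =>
      let tail := cs.drop prev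
      if PySem.Chars.strip tail ≠ [] then parts ++ [String.ofList tail] else parts

def smart_split_args_alt (s : String) : List String :=
  pvBFin s.toList (s.toList.foldl pvBScan (0, 0, none, []))

-- ===== PRECONDITION & SPEC =====
def Spec_smart_split_args (s : String) (out : List String) : Prop := out = smart_split_args_alt s
instance (s : String) (out : List String) : Decidable (Spec_smart_split_args s out) := by unfold Spec_smart_split_args; infer_instance

-- ===== CLAIM (what is proved, stated in full; the proofs are below) =====
def Claim_equal_smart_split_args : Prop := ∀ (s : String), Dom_smart_split_args s → Spec_smart_split_args s (smart_split_args s)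

-- ===== LEMMAS AND PROOFS =====

-- a current-buffer slice grows by the character the scan is at
lemma pv_take_snoc (cs : List Char) (prev i : Nat) (c : Char) (l' : List Char)
    (hpi : prev ≤ i) (hd : cs.drop i = c :: l') :
    (cs.drop prev).take (i + 1 - prev) = (cs.drop prev).take (i - prev) ++ [c] := by
  have hlen : i < cs.length := by
    by_contra h
    rw [List.drop_eq_nil_of_le (by omega)] at hd
    simp at hd
  have hc : cs[i]? = some c := by
    have h0 : (cs.drop i)[0]? = some c := by rw [hd]; rfl
    rwa [List.getElem?_drop, Nat.add_zero] at h0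
  have : (cs.drop prev)[i - prev]? = some c := by
    rw [List.getElem?_drop, Nat.add_sub_cancel' hpi]; exact hc
  rw [show i + 1 - prev = (i - prev) + 1 by omega, List.take_add_one, this]
  simp

-- main invariant: A's loop state (parts, cur) is determined by B's (i, cuts)
lemma pv_main : ∀ (l cs : List Char) (i prev : Nat) (d : Int) (q : Option Char)
    (parts : List String) (cur : List Char) (cuts : List Nat),
    cs.drop i = l → prev ≤ i →
    cur = (cs.drop prev).take (i - prev) →
    cuts.foldl (pvBAcc cs) ([], 0) = (parts, prev) →
    pvAFin (l.foldl pvAStep (parts, cur, d, q)) = pvBFin cs (l.foldl pvBScan (i, d, q, cuts)) := by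
  intro l
  induction l with
  | nil =>
    intro cs i prev d q parts cur cuts hdrop hpi hcur hfold
    have hlen : cs.length ≤ i := by
      by_contra h
      have := List.drop_eq_nil_iff.mp hdrop
      omega
    have htail : cur = cs.drop prev := by
      rw [hcur]
      apply List.take_of_length_le
      simp; omega
    simp only [List.foldl_nil, pvAFin, pvBFin, hfold, htail]
    by_cases hnil : cs.drop prev = []
    · simp [hnil]; decide
    · simp [hnil]
  | cons c l' ih =>
    intro cs i prev d q parts cur cuts hdrop hpi hcur hfold
    have hdrop' : cs.drop (i + 1) = l' := by
      rw [← List.drop_drop, hdrop]; simp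
    have hsnoc := pv_take_snoc cs prev i c l' hpi hdrop
    simp only [List.foldl_cons]
    rcases q with _ | qc
    · -- not inside a quote
      by_cases h1 : c = '"' ∨ c = '\''
      · have hA : pvAStep (parts, cur, d, none) c = (parts, cur ++ [c], d, some c) := by
          simp [pvAStep, h1]
        have hB : pvBScan (i, d, none, cuts) c = (i + 1, d, some c, cuts) := by
          simp [pvBScan, h1]
        rw [hA, hB]
        exact ih cs (i+1) prev d (some c) parts (cur ++ [c]) cuts hdrop' (by omega)
          (by rw [hcur, hsnoc]) hfold
      · by_cases h2 : c = '(' ∨ c = '[' ∨ c = '{'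
        · have hA : pvAStep (parts, cur, d, none) c = (parts, cur ++ [c], d + 1, none) := by
            simp [pvAStep, h1, h2]
          have hB : pvBScan (i, d, none, cuts) c = (i + 1, d + 1, none, cuts) := by
            simp [pvBScan, h1, h2]
          rw [hA, hB]
          exact ih cs (i+1) prev (d+1) none parts (cur ++ [c]) cuts hdrop' (by omega)
            (by rw [hcur, hsnoc]) hfold
        · by_cases h3 : c = ')' ∨ c = ']' ∨ c = '}'
          · have hA : pvAStep (parts, cur, d, none) c = (parts, cur ++ [c], d - 1, none) := by
              simp [pvAStep, h1, h2, h3]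
            have hB : pvBScan (i, d, none, cuts) c = (i + 1, d - 1, none, cuts) := by
              simp [pvBScan, h1, h2, h3]
            rw [hA, hB]
            exact ih cs (i+1) prev (d-1) none parts (cur ++ [c]) cuts hdrop' (by omega)
              (by rw [hcur, hsnoc]) hfold
          · by_cases h4 : c = ',' ∧ d = 0
            · have hA : pvAStep (parts, cur, d, none) c
                  = (parts ++ [String.ofList cur], [], d, none) := by
                simp [pvAStep, h4]
              have hB : pvBScan (i, d, none, cuts) c = (i + 1, d, none, cuts ++ [i]) := by
                simp [pvBScan, h4]
              rw [hA, hB]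
              apply ih cs (i+1) (i+1) d none (parts ++ [String.ofList cur]) [] (cuts ++ [i])
                hdrop' (by omega) (by simp)
              rw [List.foldl_append, hfold]
              simp [pvBAcc, hcur]
            · have hA : pvAStep (parts, cur, d, none) c = (parts, cur ++ [c], d, none) := by
                simp [pvAStep, h1, h2, h3, h4]
              have hB : pvBScan (i, d, none, cuts) c = (i + 1, d, none, cuts) := by
                simp [pvBScan, h1, h2, h3, h4]
              rw [hA, hB]
              exact ih cs (i+1) prev d none parts (cur ++ [c]) cuts hdrop' (by omega)
                (by rw [hcur, hsnoc]) hfold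
    · -- inside a quote qc
      by_cases hq : c = qc
      · have hA : pvAStep (parts, cur, d, some qc) c = (parts, cur ++ [c], d, none) := by
          simp [pvAStep, hq]
        have hB : pvBScan (i, d, some qc, cuts) c = (i + 1, d, none, cuts) := by
          simp [pvBScan, hq]
        rw [hA, hB]
        exact ih cs (i+1) prev d none parts (cur ++ [c]) cuts hdrop' (by omega)
          (by rw [hcur, hsnoc]) hfold
      · have hA : pvAStep (parts, cur, d, some qc) c = (parts, cur ++ [c], d, some qc) := by
          simp [pvAStep, hq]
        have hB : pvBScan (i, d, some qc, cuts) c = (i + 1, d, some qc, cuts) := by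
          simp [pvBScan, hq]
        rw [hA, hB]
        exact ih cs (i+1) prev d (some qc) parts (cur ++ [c]) cuts hdrop' (by omega)
          (by rw [hcur, hsnoc]) hfold

-- ===== VERDICT (by name: the statement is the Claim_ definition above) =====
theorem smart_split_args_spec : Claim_equal_smart_split_args := by
  intro s _
  unfold Spec_smart_split_args smart_split_args smart_split_args_alt
  exact pv_main s.toList s.toList 0 0 0 none [] [] [] (by simp) (Nat.le_refl 0) (by simp) rfl
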